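-- pv_equiv track=rewrite | github.com/ongThien/tira_spring2025 | week4/hashing.py | hash_value
-- ===== SOURCE A (Python) =====
-- def hash_value(string):
--     A = 23
--     M = 2**32
--     n = len(string)
--
--     value = 0
--     for ch in string:
--         value += coded(ch) * (A ** (n - 1))
--         n -= 1
--
--     return value % M
--
-- def coded(char):
--     return ord(char) - 97
-- ===== SOURCE B (Python) =====
-- def hash_value(string):
--     M = 2**32
--     value = 0
--     for ch in string:
--         value = (value * 23 + ord(ch) - 97) % M
--     return value
-- ===== Notes on version B (the rewrite author's own statement) =====
-- stated objective: faster
-- what changed: Replaces the sum of coded(ch)*23^(n-1-i) with freshly computed bignum powers by Horner's rule with mod-2^32 reduction at each step, so numbers stay word-sized.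
import Mathlib
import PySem

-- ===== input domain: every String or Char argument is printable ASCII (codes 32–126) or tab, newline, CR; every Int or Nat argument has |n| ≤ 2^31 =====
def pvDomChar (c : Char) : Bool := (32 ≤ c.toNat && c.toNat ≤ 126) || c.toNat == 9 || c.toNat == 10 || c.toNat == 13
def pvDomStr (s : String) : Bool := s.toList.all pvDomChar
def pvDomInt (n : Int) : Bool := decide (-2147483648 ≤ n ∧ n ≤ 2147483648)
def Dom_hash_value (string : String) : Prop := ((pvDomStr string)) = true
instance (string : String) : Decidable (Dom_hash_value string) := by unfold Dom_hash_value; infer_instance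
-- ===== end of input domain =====

-- B replaces A's sum of coded(ch)*23^(n-1-i) (fresh bignum power each step, O(n^2))
-- by Horner's rule with mod-2^32 reduction at each step (O(n)); objective: faster.

-- ===== PORT A =====
def coded (char : Char) : Int := (char.toNat : Int) - 97

-- A's loop state is (value, n); n starts at len(string) and is ≥ 1 at every use of
-- n - 1, so Nat subtraction is exact here.
def hash_value (string : String) : Int :=
  let n := string.toList.length
  let st := string.toList.foldl
    (fun (st : Int × Nat) ch => (st.1 + coded ch * (23 : Int) ^ (st.2 - 1), st.2 - 1))
    ((0 : Int), n)
  PySem.Int.mod st.1 (2 ^ 32)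

-- ===== PORT B =====
def hash_value_alt (string : String) : Int :=
  string.toList.foldl
    (fun (value : Int) ch => PySem.Int.mod (value * 23 + ((ch.toNat : Int) - 97)) (2 ^ 32))
    0

-- ===== PRECONDITION & SPEC =====
def Spec_hash_value (string : String) (out : Int) : Prop := out = hash_value_alt string
instance (string : String) (out : Int) : Decidable (Spec_hash_value string out) := by unfold Spec_hash_value; infer_instance

-- ===== CLAIM (what is proved, stated in full; the proofs are below) =====
def Claim_equal_hash_value : Prop := ∀ (string : String), Dom_hash_value string → Spec_hash_value string (hash_value string)

-- ===== LEMMAS AND PROOFS =====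

-- Horner evaluation without mod
def horner (v : Int) (l : List Char) : Int :=
  l.foldl (fun a c => a * 23 + coded c) v

theorem horner_shift (l : List Char) (v : Int) :
    horner v l = v * (23 : Int) ^ l.length + horner 0 l := by
  induction l generalizing v with
  | nil => simp [horner]
  | cons c t ih =>
    simp only [horner, List.foldl_cons, List.length_cons] at *
    rw [ih (v * 23 + coded c), ih (0 * 23 + coded c)]
    ring

-- A's fold computes v + horner 0 l when started at n = l.length
theorem afold_eq (l : List Char) (v : Int) :
    (l.foldl (fun (st : Int × Nat) ch =>
        (st.1 + coded ch * (23 : Int) ^ (st.2 - 1), st.2 - 1)) (v, l.length)).1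
      = v + horner 0 l := by
  induction l generalizing v with
  | nil => simp [horner]
  | cons c t ih =>
    simp only [List.foldl_cons, List.length_cons, Nat.add_sub_cancel]
    rw [ih (v + coded c * (23 : Int) ^ t.length)]
    have : horner 0 (c :: t) = coded c * (23 : Int) ^ t.length + horner 0 t := by
      simp only [horner, List.foldl_cons]
      have := horner_shift t (0 * 23 + coded c)
      simp only [horner] at this ⊢
      rw [this]; ring
    rw [this]; ring

theorem mod_pos_step (a c : Int) :
    (a % (2 ^ 32 : Int) * 23 + c) % (2 ^ 32 : Int) = (a * 23 + c) % (2 ^ 32 : Int) := by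
  conv_lhs => rw [Int.add_emod, Int.mul_emod, Int.emod_emod_of_dvd a (dvd_refl _)]
  conv_rhs => rw [Int.add_emod, Int.mul_emod]

-- B's fold started at v % M equals (horner v l) % M
theorem bfold_eq (l : List Char) (v : Int) :
    l.foldl (fun (value : Int) ch =>
        PySem.Int.mod (value * 23 + ((ch.toNat : Int) - 97)) (2 ^ 32))
      (v % (2 ^ 32)) = horner v l % (2 ^ 32) := by
  induction l generalizing v with
  | nil => simp [horner]
  | cons c t ih =>
    simp only [List.foldl_cons, horner, coded] at *
    rw [PySem.Int.mod_eq_emod_of_pos (by norm_num), mod_pos_step v _]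
    exact ih (v * 23 + (((c.toNat : Int)) - 97))

theorem hash_value_spec : Claim_equal_hash_value := by
  intro s _
  show hash_value s = hash_value_alt s
  simp only [hash_value, hash_value_alt]
  rw [afold_eq s.toList 0, PySem.Int.mod_eq_emod_of_pos (by norm_num)]
  have := bfold_eq s.toList 0
  simp only [Int.zero_emod, horner] at this
  simp only [this, horner]
  ring_nf
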